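-- pv_equiv track=rewrite | github.com/nbro/andz | ands/algorithms/dac/find_extrema.py | find_extremum_not_in_place
-- ===== SOURCE A (Python) =====
-- def find_extremum_not_in_place(ls: list, _find_max: bool = True) -> object:
--     """Finds (not in place) the maximum (or minimum) element in `ls`, which is assumed to be a list.
--
--     It finds the maximum if `_find_max` is set to `True`, it finds the minimum otherwise."""
--     if len(ls) == 0:
--         return
--     if len(ls) == 1:
--         return ls[0]
--     elif len(ls) == 2:
--         if _find_max:
--             return ls[0] if ls[0] > ls[1] else ls[1]
--         else:
--             return ls[0] if ls[0] < ls[1] else ls[1]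
--     else:
--         mid = len(ls) // 2
--
--         m1 = find_extremum_not_in_place(ls[0:mid], _find_max)
--         m2 = find_extremum_not_in_place(ls[mid:], _find_max)
--
--         if _find_max:
--             return m1 if m1 > m2 else m2
--         else:
--             return m1 if m1 < m2 else m2
-- ===== SOURCE B (Python) =====
-- def find_extremum_not_in_place(ls: list, _find_max: bool = True) -> object:
--     """Finds (not in place) the maximum (or minimum) element in `ls`.
--
--     Single left-to-right scan instead of recursive divide and conquer."""
--     if len(ls) == 0:
--         return
--     best = ls[0]
--     for x in ls[1:]:
--         if (x > best) if _find_max else (x < best):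
--             best = x
--     return best
-- ===== Notes on version B (the rewrite author's own statement) =====
-- stated objective: simpler
-- what changed: Replaces the recursive divide-and-conquer with list slicing at every level by a single left-to-right scan keeping the best element seen so far.
import Mathlib
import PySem

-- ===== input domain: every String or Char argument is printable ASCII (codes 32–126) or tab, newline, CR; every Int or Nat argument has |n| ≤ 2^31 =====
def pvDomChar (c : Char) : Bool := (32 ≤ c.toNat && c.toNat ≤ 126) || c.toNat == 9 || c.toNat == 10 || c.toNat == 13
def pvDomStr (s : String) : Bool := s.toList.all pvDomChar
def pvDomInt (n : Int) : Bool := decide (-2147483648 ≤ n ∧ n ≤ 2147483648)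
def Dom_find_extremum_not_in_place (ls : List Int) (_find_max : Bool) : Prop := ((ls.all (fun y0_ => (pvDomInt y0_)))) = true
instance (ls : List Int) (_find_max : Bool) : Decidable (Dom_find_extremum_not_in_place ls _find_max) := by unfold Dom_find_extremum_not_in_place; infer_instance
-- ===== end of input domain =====

-- B replaces A's recursive divide-and-conquer (with slicing) by a single left-to-right
-- scan keeping the best element seen so far; equal values make equal results on Int lists.

-- ===== PORT A =====
-- Literal port of the recursive divide-and-conquer.  The recursion is driven by a Nat
-- fuel (= ls.length at the top call), a pure totality guard: every recursive call is on a
-- strictly shorter slice, so the fuel is never exhausted.  In the `else` branch the Python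
-- compares m1 and m2 with `>`/`<`; both halves are nonempty there, so m1 and m2 are
-- always ints — the `| _, _ => none` arm is unreachable (Python would raise TypeError).
def find_extremum_not_in_place_go (fuel : Nat) (ls : List Int) (_find_max : Bool) : Option Int :=
  match fuel with
  | 0 => none  -- never reached: the initial fuel bounds the recursion depth
  | fuel + 1 =>
    if ls.length = 0 then none
    else if ls.length = 1 then PySem.List.pyGet? ls 0
    else if ls.length = 2 then
      match PySem.List.pyGet? ls 0, PySem.List.pyGet? ls 1 with
      | some a, some b =>
        if _find_max then (if a > b then some a else some b)
        else (if a < b then some a else some b)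
      | _, _ => none
    else
      let mid : Nat := ls.length / 2
      let m1 := find_extremum_not_in_place_go fuel (PySem.List.slice ls (some 0) (some (mid : Int))) _find_max
      let m2 := find_extremum_not_in_place_go fuel (PySem.List.slice ls (some (mid : Int)) (some (ls.length : Int))) _find_max
      match m1, m2 with
      | some a, some b =>
        if _find_max then (if a > b then m1 else m2)
        else (if a < b then m1 else m2)
      | _, _ => none

def find_extremum_not_in_place (ls : List Int) (_find_max : Bool) : Option Int :=
  find_extremum_not_in_place_go ls.length ls _find_max

-- ===== PORT B =====
def find_extremum_not_in_place_alt (ls : List Int) (_find_max : Bool) : Option Int :=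
  match ls with
  | [] => none
  | x :: xs =>
    some (xs.foldl (fun best y =>
      if (if _find_max then y > best else y < best) then y else best) x)

-- ===== PRECONDITION & SPEC =====
def Spec_find_extremum_not_in_place (ls : List Int) (_find_max : Bool) (out : Option Int) : Prop := out = find_extremum_not_in_place_alt ls _find_max
instance (ls : List Int) (_find_max : Bool) (out : Option Int) : Decidable (Spec_find_extremum_not_in_place ls _find_max out) := by unfold Spec_find_extremum_not_in_place; infer_instance

-- ===== CLAIM (what is proved, stated in full; the proofs are below) =====
def Claim_equal_find_extremum_not_in_place : Prop := ∀ (ls : List Int) (_find_max : Bool), Dom_find_extremum_not_in_place ls _find_max → Spec_find_extremum_not_in_place ls _find_max (find_extremum_not_in_place ls _find_max)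

-- ===== LEMMAS AND PROOFS =====

-- B's update step: the better of `a` and the new element `b` (max for `_find_max`, min otherwise)
def pvExt (fm : Bool) (a b : Int) : Int := if (if fm then b > a else b < a) then b else a

-- common reference value: fold of pvExt over a nonempty list
def pvE (fm : Bool) (l : List Int) : Option Int :=
  match l with
  | [] => none
  | x :: xs => some (xs.foldl (pvExt fm) x)

theorem pvExt_true (a b : Int) : pvExt true a b = max a b := by
  simp only [pvExt, if_true]
  split_ifs <;> omega

theorem pvExt_false (a b : Int) : pvExt false a b = min a b := by
  simp only [pvExt, Bool.false_eq_true, if_false]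
  split_ifs <;> omega

theorem pvExt_assoc (fm : Bool) (a b c : Int) :
    pvExt fm (pvExt fm a b) c = pvExt fm a (pvExt fm b c) := by
  cases fm <;> simp only [pvExt_true, pvExt_false, max_assoc, min_assoc]

theorem foldl_pvExt_out (fm : Bool) (ys : List Int) (a y : Int) :
    ys.foldl (pvExt fm) (pvExt fm a y) = pvExt fm a (ys.foldl (pvExt fm) y) := by
  induction ys generalizing y with
  | nil => rfl
  | cons z zs ih => simp only [List.foldl_cons, pvExt_assoc, ih]

theorem pvE_append (fm : Bool) (x y : Int) (xs ys : List Int) :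
    pvE fm ((x :: xs) ++ (y :: ys)) =
      some (pvExt fm (xs.foldl (pvExt fm) x) (ys.foldl (pvExt fm) y)) := by
  simp [pvE, List.foldl_append, ← foldl_pvExt_out]

theorem alt_eq_pvE (ls : List Int) (fm : Bool) :
    find_extremum_not_in_place_alt ls fm = pvE fm ls := by
  cases ls <;> rfl

theorem go_eq_pvE (fuel : Nat) :
    ∀ (ls : List Int) (fm : Bool), ls.length ≤ fuel →
      find_extremum_not_in_place_go fuel ls fm = pvE fm ls := by
  induction fuel with
  | zero =>
    intro ls fm h
    have : ls = [] := List.length_eq_zero_iff.mp (by omega)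
    subst this
    rfl
  | succ n ih =>
    intro ls fm h
    rw [find_extremum_not_in_place_go]
    by_cases h0 : ls.length = 0
    · obtain rfl := List.length_eq_zero_iff.mp h0
      rfl
    by_cases h1 : ls.length = 1
    · obtain ⟨a, rfl⟩ := List.length_eq_one_iff.mp h1
      simp [pvE, PySem.List.pyGet?, PySem.List.pyIdx?]
    by_cases h2 : ls.length = 2
    · match ls, h2 with
      | [a, b], _ =>
        cases fm <;>
          simp only [pvE, pvExt, PySem.List.pyGet?, PySem.List.pyIdx?, List.length_cons,
            List.length_nil, List.foldl] <;>
          norm_num <;> split_ifs <;> simp_all <;> omega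
    · simp only [h0, h1, h2, if_false]
      have hlen : 3 ≤ ls.length := by omega
      have hmid1 : 1 ≤ ls.length / 2 := by omega
      have hmid2 : ls.length / 2 < ls.length := by omega
      rw [PySem.List.slice_zero_start, PySem.List.slice_to_natCast,
          PySem.List.slice_natCast]
      have hl1 : (ls.take (ls.length / 2)).length ≤ n := by
        rw [List.length_take]; omega
      have hl2 : ((ls.drop (ls.length / 2)).take (ls.length - ls.length / 2)).length ≤ n := by
        rw [List.length_take, List.length_drop]; omega
      rw [ih _ fm hl1, ih _ fm hl2]
      -- the two halves are nonempty
      obtain ⟨x, xs, hx⟩ : ∃ x xs, ls.take (ls.length / 2) = x :: xs := by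
        cases hc : ls.take (ls.length / 2) with
        | nil =>
          exfalso; have := congrArg List.length hc
          rw [List.length_take] at this; simp only [List.length_nil] at this; omega
        | cons x xs => exact ⟨x, xs, rfl⟩
      obtain ⟨y, ys, hy⟩ : ∃ y ys,
          (ls.drop (ls.length / 2)).take (ls.length - ls.length / 2) = y :: ys := by
        cases hc : (ls.drop (ls.length / 2)).take (ls.length - ls.length / 2) with
        | nil =>
          exfalso; have := congrArg List.length hc
          rw [List.length_take, List.length_drop] at this
          simp only [List.length_nil] at this; omega
        | cons y ys => exact ⟨y, ys, rfl⟩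
      have hsplit : ls = (x :: xs) ++ (y :: ys) := by
        rw [← hx, ← hy,
          List.take_of_length_le (le_of_eq (List.length_drop (l := ls))),
          List.take_append_drop]
      rw [hx, hy]
      conv_rhs => rw [hsplit]
      rw [pvE_append]
      simp only [pvE]
      cases fm <;>
        simp only [pvExt_true, pvExt_false, Bool.false_eq_true, if_false, if_true] <;>
        split_ifs <;> simp only [Option.some.injEq] <;> omega

theorem a_eq_pvE (ls : List Int) (fm : Bool) :
    find_extremum_not_in_place ls fm = pvE fm ls :=
  go_eq_pvE ls.length ls fm le_rfl

-- ===== VERDICT (by name: the statement is the Claim_ definition above) =====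
theorem find_extremum_not_in_place_spec : Claim_equal_find_extremum_not_in_place := by
  intro ls fm _
  unfold Spec_find_extremum_not_in_place
  rw [alt_eq_pvE, a_eq_pvE]
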